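-- pv_equiv track=rewrite | github.com/mikkelfo/CORE-BEHRT | ehr2vec/data_fixes/adapt.py | convert_segment
-- ===== SOURCE A (Python) =====
-- def convert_segment(segments: list) -> list:
--     """From segment AABBCC to segment 001100111"""
--     converted_segments = []
--     flag = 0
--
--     for i in range(len(segments)):
--         converted_segments.append(flag)
--
--         # Check if we're not at the last segment
--         if i != len(segments) - 1:
--             current_segment = segments[i]
--             next_segment = segments[i + 1]
--
--             # Check if the current segment is different from the next one
--             if current_segment != next_segment:
--                 flag = 1 - flag
--
--     return converted_segments
-- ===== SOURCE B (Python) =====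
-- def convert_segment(segments: list) -> list:
--     """From segment AABBCC to segment 001100111"""
--     if not segments:
--         return []
--     # boundary table over adjacent pairs, then a prefix-parity scan over it
--     boundaries = [int(a != b) for a, b in zip(segments, segments[1:])]
--     out = [0]
--     acc = 0
--     for x in boundaries:
--         acc = (acc + x) % 2
--         out.append(acc)
--     return out
-- ===== Notes on version B (the rewrite author's own statement) =====
-- stated objective: alternative
-- what changed: Replaces the fused index loop with toggle state by two differently-shaped passes: a boundary table built from zipped adjacent pairs, then a prefix-parity scan over that table.
import Mathlib
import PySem

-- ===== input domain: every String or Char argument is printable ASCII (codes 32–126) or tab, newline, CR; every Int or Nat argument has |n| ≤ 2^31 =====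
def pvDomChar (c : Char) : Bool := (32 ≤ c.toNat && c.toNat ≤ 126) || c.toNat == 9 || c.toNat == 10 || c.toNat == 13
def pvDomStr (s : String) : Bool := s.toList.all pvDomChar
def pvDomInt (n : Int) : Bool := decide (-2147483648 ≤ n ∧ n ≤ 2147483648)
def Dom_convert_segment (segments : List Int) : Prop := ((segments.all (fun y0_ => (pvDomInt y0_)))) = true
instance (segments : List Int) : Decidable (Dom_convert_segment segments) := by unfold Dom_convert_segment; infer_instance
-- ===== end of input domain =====

-- B replaces A's fused index loop (toggle flag while appending) by a boundary table over
-- zipped adjacent pairs followed by a prefix-parity scan; equal output on all inputs (alternative decomposition).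


-- ===== PORT A =====
-- loop body of A: append flag; if i != len-1 and segments[i] != segments[i+1]: flag = 1 - flag
-- (indices are always in range here, so segments[i] is ported as pyGetD with default 0)
def csStepA (segments : List Int) (st : Int × List Int) (i : Int) : Int × List Int :=
  let converted := st.2 ++ [st.1]
  if i ≠ (segments.length : Int) - 1 then
    if PySem.List.pyGetD segments i 0 ≠ PySem.List.pyGetD segments (i + 1) 0 then
      (1 - st.1, converted)
    else (st.1, converted)
  else (st.1, converted)

def convert_segment (segments : List Int) : List Int :=
  ((PySem.List.pyRange 0 (segments.length : Int) 1).foldl (csStepA segments) (0, [])).2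

-- ===== PORT B =====
-- one scan step of Source B's second pass: acc = (acc + x) % 2; out.append(acc)
def csScanStep (st : Int × List Int) (x : Int) : Int × List Int :=
  let acc := PySem.Int.mod (st.1 + x) 2
  (acc, st.2 ++ [acc])

def convert_segment_alt (segments : List Int) : List Int :=
  match segments with
  | [] => []
  | _ :: _ =>
    let boundaries := (segments.zip segments.tail).map
      (fun p => if p.1 ≠ p.2 then (1 : Int) else 0)
    (boundaries.foldl csScanStep (0, [0])).2

-- ===== PRECONDITION & SPEC =====
def Spec_convert_segment (segments : List Int) (out : List Int) : Prop := out = convert_segment_alt segments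
instance (segments : List Int) (out : List Int) : Decidable (Spec_convert_segment segments out) := by unfold Spec_convert_segment; infer_instance

-- ===== CLAIM (what is proved, stated in full; the proofs are below) =====
def Claim_equal_convert_segment : Prop := ∀ (segments : List Int), Dom_convert_segment segments → Spec_convert_segment segments (convert_segment segments)

-- ===== LEMMAS AND PROOFS =====

-- reference recursion: emit the flag, toggle it at each boundary
def csRef (f : Int) : List Int → List Int
  | [] => []
  | [_] => [f]
  | a :: b :: t => f :: csRef (if a ≠ b then 1 - f else f) (b :: t)

lemma csRef_nil (f : Int) : csRef f [] = [] := rfl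
lemma csRef_single (f a : Int) : csRef f [a] = [f] := rfl
lemma csRef_cons₂ (f a b : Int) (t : List Int) :
    csRef f (a :: b :: t) = f :: csRef (if a ≠ b then 1 - f else f) (b :: t) := rfl

-- B's scan, started with flag f already emitted, computes csRef
lemma alt_scan_eq_ref (t : List Int) : ∀ (c f : Int) (out : List Int), (f = 0 ∨ f = 1) →
    ((((c :: t).zip t).map (fun p => if p.1 ≠ p.2 then (1 : Int) else 0)).foldl
      csScanStep (f, out ++ [f])).2 = out ++ csRef f (c :: t) := by
  induction t with
  | nil => intro c f out _; simp [csRef_single]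
  | cons d t' ih =>
    intro c f out hf
    have hstep : csScanStep (f, out ++ [f]) (if c ≠ d then (1 : Int) else 0)
        = ((if c ≠ d then 1 - f else f), (out ++ [f]) ++ [if c ≠ d then 1 - f else f]) := by
      rcases hf with hf | hf <;> subst hf <;> by_cases h : c = d <;>
        simp [csScanStep, h, PySem.Int.mod]
    have hf' : (if c ≠ d then 1 - f else f) = 0 ∨ (if c ≠ d then 1 - f else f) = 1 := by
      rcases hf with hf | hf <;> subst hf <;> by_cases h : c = d <;> simp [h]
    calc ((((c :: d :: t').zip (d :: t')).map (fun p => if p.1 ≠ p.2 then (1 : Int) else 0)).foldl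
          csScanStep (f, out ++ [f])).2
        = ((((d :: t').zip t').map (fun p => if p.1 ≠ p.2 then (1 : Int) else 0)).foldl
          csScanStep ((if c ≠ d then 1 - f else f),
            (out ++ [f]) ++ [if c ≠ d then 1 - f else f])).2 := by
          simp only [List.zip_cons_cons, List.map_cons, List.foldl_cons, hstep]
      _ = (out ++ [f]) ++ csRef (if c ≠ d then 1 - f else f) (d :: t') := ih d _ (out ++ [f]) hf'
      _ = out ++ csRef f (c :: d :: t') := by rw [csRef_cons₂]; simp

-- A's loop, from index k on, computes csRef on the dropped suffix
lemma a_loop_eq_ref (s : List Int) (m : Nat) : ∀ (k : Nat) (f : Int) (out : List Int),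
    k + m = s.length →
    ((PySem.List.pyRange (k : Int) (s.length : Int) 1).foldl (csStepA s) (f, out)).2
      = out ++ csRef f (s.drop k) := by
  induction m with
  | zero =>
    intro k f out hk
    have hk' : k = s.length := by omega
    subst hk'
    rw [PySem.List.pyRange_one_eq_nil (le_refl _)]
    simp [csRef_nil]
  | succ m ih =>
    intro k f out hk
    have hklt : (k : Int) < (s.length : Int) := by exact_mod_cast (by omega : k < s.length)
    rw [PySem.List.pyRange_one_cons hklt]
    have hdropk : s.drop k = s[k]'(by omega) :: s.drop (k + 1) := by
      rw [List.drop_eq_getElem_cons (by omega)]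
    by_cases hlast : k = s.length - 1
    · -- last index: no toggle, remaining range is empty
      have h1 : (k : Int) = (s.length : Int) - 1 := by omega
      have hm : m = 0 := by omega
      subst hm
      have hdrop1 : s.drop (k + 1) = [] := List.drop_eq_nil_of_le (by omega)
      simp only [List.foldl_cons, csStepA, h1, ne_eq, not_true_eq_false, if_false]
      rw [PySem.List.pyRange_one_eq_nil (by omega)]
      simp [hdropk, hdrop1, csRef_single]
    · -- not last: toggle on boundary, then apply IH at k+1
      have h1 : (k : Int) ≠ (s.length : Int) - 1 := by
        intro h; apply hlast; omega
      have hk1 : k + 1 < s.length := by omega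
      have hdropk1 : s.drop (k + 1) = s[k + 1]'hk1 :: s.drop (k + 2) := by
        rw [List.drop_eq_getElem_cons hk1]
      have hga : PySem.List.pyGetD s (k : Int) 0 = s[k]'(by omega) := by
        rw [PySem.List.pyGetD_natCast]; exact List.getD_eq_getElem s 0 _
      have hgb : PySem.List.pyGetD s ((k : Int) + 1) 0 = s[k + 1]'hk1 := by
        have hc : (k : Int) + 1 = ((k + 1 : Nat) : Int) := by push_cast; ring
        rw [hc, PySem.List.pyGetD_natCast]; exact List.getD_eq_getElem s 0 _
      have hcast : (k : Int) + 1 = ((k + 1 : Nat) : Int) := by push_cast; ring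
      simp only [List.foldl_cons, csStepA, h1, ne_eq, not_false_eq_true, if_true, hga, hgb]
      by_cases hne : s[k]'(by omega) = s[k + 1]'hk1
      · simp only [hne, not_true_eq_false, if_false]
        rw [hcast, ih (k + 1) f (out ++ [f]) (by omega)]
        rw [hdropk, hdropk1, csRef_cons₂, ← hdropk1]
        simp [hne]
      · simp only [hne, not_false_eq_true, if_true]
        rw [hcast, ih (k + 1) (1 - f) (out ++ [f]) (by omega)]
        rw [hdropk, hdropk1, csRef_cons₂, ← hdropk1]
        simp [hne]

-- ===== VERDICT (by name: the statement is the Claim_ definition above) =====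
theorem convert_segment_spec : Claim_equal_convert_segment := by
  intro segments _
  unfold Spec_convert_segment
  cases segments with
  | nil => simp [convert_segment, convert_segment_alt, PySem.List.pyRange_one_eq_nil]
  | cons c t =>
    have hA := a_loop_eq_ref (c :: t) (c :: t).length 0 0 [] (by omega)
    simp only [Nat.cast_zero, List.drop_zero, List.nil_append] at hA
    have hB := alt_scan_eq_ref t c 0 [] (Or.inl rfl)
    simp only [List.nil_append] at hB
    show ((PySem.List.pyRange 0 ((c :: t).length : Int) 1).foldl (csStepA (c :: t)) (0, [])).2
      = convert_segment_alt (c :: t)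
    rw [hA]
    exact hB.symm
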